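-- pv_equiv track=rewrite | github.com/EddyZhou97/one-question-per-day | questions/leetcode/solution_0001/python/Solution.py | checkDuplicated
-- ===== SOURCE A (Python) =====
-- from typing import List, Dict
--
-- def checkDuplicated(inputStr: str) -> bool:
--     values: List[str] = str.split(inputStr, ',')
--     str_dict: Dict[str, int] = dict()
--     for v in values:
--         if v in str_dict:
--             return True
--         str_dict[v] = 1
--     return False
-- ===== SOURCE B (Python) =====
-- def checkDuplicated(inputStr: str) -> bool:
--     values = str.split(inputStr, ',')
--     return len(values) != len(set(values))
-- ===== Notes on version B (the rewrite author's own statement) =====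
-- stated objective: simpler
-- what changed: Replaces the incremental dict-membership loop with early return by one bulk set construction and a cardinality comparison len(values) != len(set(values)).
import Mathlib
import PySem

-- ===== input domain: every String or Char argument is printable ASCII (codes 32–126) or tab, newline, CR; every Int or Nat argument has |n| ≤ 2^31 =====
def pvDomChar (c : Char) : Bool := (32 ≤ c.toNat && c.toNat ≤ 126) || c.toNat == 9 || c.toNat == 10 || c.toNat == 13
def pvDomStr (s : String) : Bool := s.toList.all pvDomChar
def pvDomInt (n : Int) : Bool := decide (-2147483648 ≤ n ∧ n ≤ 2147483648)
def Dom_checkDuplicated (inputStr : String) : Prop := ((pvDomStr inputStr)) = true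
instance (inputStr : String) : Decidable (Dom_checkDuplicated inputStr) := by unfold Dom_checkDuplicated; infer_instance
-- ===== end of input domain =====

-- B replaces A's incremental dict-membership loop (with early return) by one bulk
-- set construction and a cardinality comparison; objective: simpler.

-- ===== PORT A =====
-- the 'for v in values' loop with its early 'return True'
def checkDuplicatedLoop : List String → PySem.Dict String Int → Bool
  | [], _ => false
  | v :: rest, d => if d.contains v then true else checkDuplicatedLoop rest (d.insert v 1)

def checkDuplicated (inputStr : String) : Bool :=
  let values : List String := (PySem.Str.split? inputStr ",").getD []
  checkDuplicatedLoop values PySem.Dict.empty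

-- ===== PORT B =====
def checkDuplicated_alt (inputStr : String) : Bool :=
  let values : List String := (PySem.Str.split? inputStr ",").getD []
  values.length != (PySem.Set.ofList values).length

-- ===== PRECONDITION & SPEC =====
def Spec_checkDuplicated (inputStr : String) (out : Bool) : Prop := out = checkDuplicated_alt inputStr
instance (inputStr : String) (out : Bool) : Decidable (Spec_checkDuplicated inputStr out) := by unfold Spec_checkDuplicated; infer_instance

-- ===== CLAIM (what is proved, stated in full; the proofs are below) =====
def Claim_equal_checkDuplicated : Prop := ∀ (inputStr : String), Dom_checkDuplicated inputStr → Spec_checkDuplicated inputStr (checkDuplicated inputStr)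

-- ===== LEMMAS AND PROOFS =====

-- A's loop returns False exactly when the remaining values are distinct and none is already a key
lemma checkDuplicatedLoop_eq_false_iff (l : List String) (d : PySem.Dict String Int) :
    checkDuplicatedLoop l d = false ↔ l.Nodup ∧ ∀ v ∈ l, d.contains v = false := by
  induction l generalizing d with
  | nil => simp [checkDuplicatedLoop]
  | cons v rest ih =>
    rcases h : d.contains v with _ | _
    · simp only [checkDuplicatedLoop, h, Bool.false_eq_true, if_false, ih,
        List.nodup_cons, List.mem_cons, PySem.Dict.contains_insert,
        Bool.or_eq_false_iff, beq_eq_false_iff_ne]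
      constructor
      · rintro ⟨hnd, hall⟩
        refine ⟨⟨fun hm => (hall v hm).1 rfl, hnd⟩, fun w hw => ?_⟩
        rcases hw with rfl | hw
        · exact h
        · exact (hall w hw).2
      · rintro ⟨⟨hmem, hnd⟩, hall⟩
        exact ⟨hnd, fun w hw => ⟨fun he => hmem (he ▸ hw), hall w (Or.inr hw)⟩⟩
    · simp only [checkDuplicatedLoop, h, if_true, List.nodup_cons, List.mem_cons]
      constructor
      · intro hf; exact absurd hf (by simp)
      · rintro ⟨_, hall⟩
        have := hall v (Or.inl rfl)
        simp [h] at this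

-- |set(l)| = |l| exactly when l has no duplicates (induction from the right)
lemma length_ofList_eq_iff (l : List String) :
    (PySem.Set.ofList l).length = l.length ↔ l.Nodup := by
  induction l using List.reverseRecOn with
  | nil => simp [PySem.Set.ofList]
  | append_singleton xs x ih =>
    rw [PySem.Set.ofList_append_singleton, PySem.Set.add_eq_ite]
    by_cases hx : x ∈ PySem.Set.ofList xs
    · have hx' : x ∈ xs := (PySem.Set.mem_ofList xs x).1 hx
      have hle := PySem.Set.length_ofList_le (xs := xs)
      rw [if_pos hx]
      simp only [List.length_append, List.length_cons, List.length_nil]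
      constructor
      · intro hlen; omega
      · intro hnd
        exact (((List.nodup_append.mp hnd).2.2 x hx' x (by simp)) rfl).elim
    · rw [if_neg hx]
      simp only [List.length_append, List.length_cons, List.length_nil, List.nodup_append]
      constructor
      · intro hlen
        refine ⟨ih.mp (by omega), List.nodup_singleton x, ?_⟩
        intro a ha b hb he
        rw [List.mem_singleton] at hb
        rw [he, hb] at ha
        exact hx ((PySem.Set.mem_ofList xs x).2 ha)
      · rintro ⟨h1, -, -⟩
        have := ih.mpr h1
        omega

lemma loop_eq_len (l : List String) :
    checkDuplicatedLoop l PySem.Dict.empty = (l.length != (PySem.Set.ofList l).length) := by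
  rcases hb : checkDuplicatedLoop l PySem.Dict.empty with _ | _
  · have h := (checkDuplicatedLoop_eq_false_iff l PySem.Dict.empty).1 hb
    have hlen := (length_ofList_eq_iff l).2 h.1
    simp [hlen]
  · have hnd : ¬ l.Nodup := by
      intro hnd
      have hf : checkDuplicatedLoop l PySem.Dict.empty = false :=
        (checkDuplicatedLoop_eq_false_iff l PySem.Dict.empty).2
          ⟨hnd, fun v _ => by simp [PySem.Dict.contains_empty]⟩
      rw [hf] at hb
      exact absurd hb (by simp)
    have hne : (PySem.Set.ofList l).length ≠ l.length :=
      fun hlen => hnd ((length_ofList_eq_iff l).1 hlen)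
    simp [bne_iff_ne]
    omega

-- ===== VERDICT (by name: the statement is the Claim_ definition above) =====
theorem checkDuplicated_spec : Claim_equal_checkDuplicated := by
  intro inputStr _
  unfold Spec_checkDuplicated checkDuplicated checkDuplicated_alt
  exact loop_eq_len _
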